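-- pv_equiv track=rewrite | github.com/younsuyoung12/auto-trader | meta/meta_decision_validator.py | _count_sentences_rough
-- ===== SOURCE A (Python) =====
-- from typing import Any, Dict, List, Optional, Set
--
-- def _count_sentences_rough(text: str) -> int:
--     s = str(text).strip()
--     if not s:
--         return 0
--     parts: List[str] = []
--     buf = ""
--     for ch in s:
--         buf += ch
--         if ch in ".!?。\n":
--             if buf.strip():
--                 parts.append(buf.strip())
--             buf = ""
--     if buf.strip():
--         parts.append(buf.strip())
--     return len(parts)
-- ===== SOURCE B (Python) =====
-- def _count_sentences_rough(text: str) -> int: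
--     s = str(text).strip()
--     n = 0
--     has = False
--     for ch in s:
--         if not ch.isspace():
--             has = True
--         if ch in ".!?。\n":
--             if has:
--                 n += 1
--             has = False
--     if has:
--         n += 1
--     return n
-- ===== Notes on version B (the rewrite author's own statement) =====
-- stated objective: simpler
-- what changed: Replaces the buffer-and-parts-list accumulation (building each segment string, stripping it twice, appending to a list whose length is returned) with a single O(1)-space scan keeping only a counter and a boolean flag that records whether the current segment contains a non-whitespace character.
import Mathlib
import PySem

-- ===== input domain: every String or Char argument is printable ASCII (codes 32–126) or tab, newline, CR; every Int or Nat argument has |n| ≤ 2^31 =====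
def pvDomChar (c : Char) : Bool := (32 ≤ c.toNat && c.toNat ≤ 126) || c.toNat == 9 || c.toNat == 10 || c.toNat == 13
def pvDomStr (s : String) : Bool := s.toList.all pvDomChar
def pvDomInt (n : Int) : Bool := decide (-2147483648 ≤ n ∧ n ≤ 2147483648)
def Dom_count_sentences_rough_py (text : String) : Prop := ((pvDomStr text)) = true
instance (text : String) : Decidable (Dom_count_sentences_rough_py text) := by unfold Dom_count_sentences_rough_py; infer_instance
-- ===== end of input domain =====

-- B replaces A's buffer/parts-list accumulation by a counter plus a has-content flag (O(1) space); return values proved equal.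

-- ===== PORT A =====
-- the delimiter characters of the Python literal ".!?。\n"
def pvDelims : List Char := ['.', '!', '?', '。', '\n']

-- one iteration of A's for-loop: state is (parts, buf)
def pvStepA (st : List (List Char) × List Char) (ch : Char) : List (List Char) × List Char :=
  let buf := st.2 ++ [ch]
  if pvDelims.contains ch then
    (if PySem.Chars.strip buf ≠ [] then st.1 ++ [PySem.Chars.strip buf] else st.1, [])
  else (st.1, buf)

def count_sentences_rough_py (text : String) : Int :=
  let s := PySem.Chars.strip text.toList
  if s = [] then 0
  else
    let st := s.foldl pvStepA ([], [])
    let parts := if PySem.Chars.strip st.2 ≠ [] then st.1 ++ [PySem.Chars.strip st.2] else st.1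
    (parts.length : Int)

-- ===== PORT B =====
-- one iteration of B's for-loop: state is (n, has)
def pvStepB (st : Int × Bool) (ch : Char) : Int × Bool :=
  let has := if ¬ PySem.Chars.isspace ch then true else st.2
  if pvDelims.contains ch then
    (if has then st.1 + 1 else st.1, false)
  else (st.1, has)

def count_sentences_rough_py_alt (text : String) : Int :=
  let s := PySem.Chars.strip text.toList
  let st := s.foldl pvStepB (0, false)
  if st.2 then st.1 + 1 else st.1

-- ===== PRECONDITION & SPEC =====
def Spec_count_sentences_rough_py (text : String) (out : Int) : Prop := out = count_sentences_rough_py_alt text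
instance (text : String) (out : Int) : Decidable (Spec_count_sentences_rough_py text out) := by unfold Spec_count_sentences_rough_py; infer_instance

-- ===== CLAIM (what is proved, stated in full; the proofs are below) =====
def Claim_equal_count_sentences_rough_py : Prop := ∀ (text : String), Dom_count_sentences_rough_py text → Spec_count_sentences_rough_py text (count_sentences_rough_py text)

-- ===== LEMMAS AND PROOFS =====

-- Python truthiness of buf.strip(): strip l is empty iff every char of l is whitespace
theorem pv_strip_eq_nil_iff (l : List Char) :
    PySem.Chars.strip l = [] ↔ ∀ c ∈ l, PySem.Chars.isspace c := by
  unfold PySem.Chars.strip PySem.Chars.rstrip PySem.Chars.lstrip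
  rw [List.reverse_eq_nil_iff, List.dropWhile_eq_nil_iff]
  constructor
  · intro h c hc
    rw [← List.takeWhile_append_dropWhile (p := PySem.Chars.isspace) (l := l)] at hc
    rcases List.mem_append.mp hc with h' | h'
    · exact List.mem_takeWhile_imp h'
    · exact h c (List.mem_reverse.mpr h')
  · intro h c hc
    exact h c (List.dropWhile_sublist _ |>.mem (List.mem_reverse.mp hc))

-- the has-flag after one char: buf++[ch] is all-whitespace iff buf is and ch is
theorem pv_inv_step (buf : List Char) (ch : Char) :
    (decide (PySem.Chars.strip (buf ++ [ch]) ≠ [])) =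
      (if ¬ PySem.Chars.isspace ch then true else decide (PySem.Chars.strip buf ≠ [])) := by
  by_cases hsp : PySem.Chars.isspace ch
  · simp only [hsp, not_true, if_neg (by trivial : ¬ False)]
    by_cases hb : PySem.Chars.strip buf = []
    · have : PySem.Chars.strip (buf ++ [ch]) = [] := by
        rw [pv_strip_eq_nil_iff] at hb ⊢
        intro c hc
        rcases List.mem_append.mp hc with h | h
        · exact hb c h
        · simpa [List.mem_singleton.mp h] using hsp
      simp [this, hb]
    · have : PySem.Chars.strip (buf ++ [ch]) ≠ [] := by
        intro h
        exact hb (by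
          rw [pv_strip_eq_nil_iff] at h ⊢
          intro c hc; exact h c (List.mem_append.mpr (Or.inl hc)))
      simp [this, hb]
  · have : PySem.Chars.strip (buf ++ [ch]) ≠ [] := by
      intro h
      exact hsp ((pv_strip_eq_nil_iff _).mp h ch (List.mem_append.mpr (Or.inr (List.mem_singleton.mpr rfl))))
    simp [this, hsp]

-- loop invariant: B's state mirrors A's (counter = parts length, flag = buf has content)
theorem pv_loop (s : List Char) :
    ∀ (parts : List (List Char)) (buf : List Char) (n : Int) (has : Bool),
    n = (parts.length : Int) → has = decide (PySem.Chars.strip buf ≠ []) →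
    (let stA := s.foldl pvStepA (parts, buf)
     let stB := s.foldl pvStepB (n, has)
     ((if PySem.Chars.strip stA.2 ≠ [] then stA.1 ++ [PySem.Chars.strip stA.2] else stA.1).length : Int)
       = (if stB.2 then stB.1 + 1 else stB.1)) := by
  induction s with
  | nil =>
    intro parts buf n has hn hh
    simp only [List.foldl_nil]
    by_cases h : PySem.Chars.strip buf = []
    · simp [h, hn, hh]
    · simp [h, hn, hh]
  | cons ch rest ih =>
    intro parts buf n has hn hh
    simp only [List.foldl_cons]
    unfold pvStepA pvStepB
    have hstep := pv_inv_step buf ch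
    by_cases hd : pvDelims.contains ch
    · simp only [hd, if_true]
      by_cases hb : PySem.Chars.strip (buf ++ [ch]) = []
      · have hhas : (if ¬ PySem.Chars.isspace ch then true else has) = false := by
          rw [hh, ← hstep]; simp [hb]
        simp only [hb, hhas]
        exact ih parts [] n false hn (by simp [PySem.Chars.strip, PySem.Chars.lstrip, PySem.Chars.rstrip])
      · have hhas : (if ¬ PySem.Chars.isspace ch then true else has) = true := by
          rw [hh, ← hstep]; simp [hb]
        simp only [hb, hhas, if_true, ne_eq]
        refine ih _ [] (n + 1) false ?_ (by simp [PySem.Chars.strip, PySem.Chars.lstrip, PySem.Chars.rstrip])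
        simp [hn]
    · simp only [hd, Bool.false_eq_true, if_false]
      exact ih parts (buf ++ [ch]) n _ hn (by rw [hh, ← hstep])

-- ===== VERDICT (by name: the statement is the Claim_ definition above) =====
theorem count_sentences_rough_py_spec : Claim_equal_count_sentences_rough_py := by
  intro text _
  unfold Spec_count_sentences_rough_py count_sentences_rough_py count_sentences_rough_py_alt
  by_cases hs : PySem.Chars.strip text.toList = []
  · simp [hs, List.foldl_nil]
  · simp only [hs]
    have := pv_loop (PySem.Chars.strip text.toList) [] [] 0 false rfl
      (by simp [PySem.Chars.strip, PySem.Chars.lstrip, PySem.Chars.rstrip])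
    simpa using this
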